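-- pv_equiv track=rewrite | github.com/Viraj27/USC-Data-Mining-DS553- | Assignment 4/task2.py | find_neighbors_set
-- ===== SOURCE A (Python) =====
-- def find_neighbors_set(row, user_bid_map, filter_threshold):
--     neighbors_set = set()
--     user_id = row[0]
--     business_set = row[1]
--
--     for potential_neighbor, their_business_set in user_bid_map.items():
--         ########## CHANGE THIS TO THRESHOLD. ###############
--         if user_id != potential_neighbor and len(business_set.intersection(their_business_set)) >= filter_threshold:
--             neighbors_set.add(potential_neighbor)
--
--     return (user_id, neighbors_set)
-- ===== SOURCE B (Python) =====
-- def find_neighbors_set(row, user_bid_map, filter_threshold):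
--     user_id = row[0]
--     business_set = row[1]
--
--     # inverted index: business -> users who have it
--     index = {}
--     for user, bids in user_bid_map.items():
--         for b in bids:
--             index.setdefault(b, []).append(user)
--
--     # count shared businesses per candidate by walking only this user's businesses
--     counts = {}
--     for b in business_set:
--         for user in index.get(b, ()):
--             counts[user] = counts.get(user, 0) + 1
--
--     neighbors = {user for user in user_bid_map
--                  if user != user_id and counts.get(user, 0) >= filter_threshold}
--     return (user_id, neighbors)
-- ===== Notes on version B (the rewrite author's own statement) =====
-- stated objective: alternative
-- what changed: Instead of computing a full set intersection of the user's businesses against every other user's set, B builds an inverted index business -> users once and walks only the given user's businesses, counting shared businesses per candidate with a dict counter, then filters candidates by the threshold.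
import Mathlib
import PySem

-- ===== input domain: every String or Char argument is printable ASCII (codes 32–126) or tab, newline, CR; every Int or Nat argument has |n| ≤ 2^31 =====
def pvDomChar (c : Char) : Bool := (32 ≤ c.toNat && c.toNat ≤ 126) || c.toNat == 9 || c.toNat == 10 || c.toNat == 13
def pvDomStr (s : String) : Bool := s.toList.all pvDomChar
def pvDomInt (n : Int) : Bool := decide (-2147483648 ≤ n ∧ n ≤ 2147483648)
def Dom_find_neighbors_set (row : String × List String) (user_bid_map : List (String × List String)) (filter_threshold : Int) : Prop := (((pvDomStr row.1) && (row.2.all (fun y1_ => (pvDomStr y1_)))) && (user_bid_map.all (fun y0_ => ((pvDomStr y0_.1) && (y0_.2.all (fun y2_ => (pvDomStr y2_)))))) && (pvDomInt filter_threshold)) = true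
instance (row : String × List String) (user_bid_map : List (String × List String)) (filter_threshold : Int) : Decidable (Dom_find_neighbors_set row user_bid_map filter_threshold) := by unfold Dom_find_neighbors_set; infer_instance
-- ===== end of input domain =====

-- B replaces the per-user set intersections of A by an inverted index business -> users
-- plus a shared-business counter walked only over the given user's businesses (objective: alternative).

-- ===== PORT A =====
def find_neighbors_set (row : String × List String) (user_bid_map : List (String × List String)) (filter_threshold : Int) : String × List String :=
  let user_id := row.1
  let business_set := row.2
  let neighbors_set := user_bid_map.foldl
    (fun ns p =>
      if user_id ≠ p.1 ∧ PySem.Set.len (PySem.Set.inter business_set p.2) ≥ filter_threshold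
      then PySem.Set.add ns p.1 else ns)
    PySem.Set.empty
  (user_id, neighbors_set)

-- ===== PORT B =====
def find_neighbors_set_alt (row : String × List String) (user_bid_map : List (String × List String)) (filter_threshold : Int) : String × List String :=
  let user_id := row.1
  let business_set := row.2
  -- inverted index: business -> users who have it (index.setdefault(b, []).append(user))
  let index : PySem.Dict String (List String) :=
    user_bid_map.foldl
      (fun ix p => p.2.foldl (fun ix b => ix.modify b [] (fun l => l ++ [p.1])) ix)
      PySem.Dict.empty
  -- counts[user] = number of shared businesses (counts[user] = counts.get(user, 0) + 1)
  let counts : PySem.Dict String Int :=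
    business_set.foldl
      (fun c b => (index.getD b []).foldl (fun c u => c.modify u 0 (fun n => n + 1)) c)
      PySem.Dict.empty
  let neighbors := user_bid_map.foldl
    (fun ns p =>
      if p.1 ≠ user_id ∧ counts.getD p.1 0 ≥ filter_threshold
      then PySem.Set.add ns p.1 else ns)
    PySem.Set.empty
  (user_id, neighbors)

-- ===== PRECONDITION & SPEC =====
-- Pre_ only requires the arguments to be well-formed encodings of Python values: the
-- association list has pairwise-distinct keys (a Python dict cannot repeat a key) and each
-- value list holds distinct elements (it encodes a Python set). No input reachable from
-- Python is excluded; A is total.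
def Pre_find_neighbors_set (row : String × List String) (user_bid_map : List (String × List String)) (filter_threshold : Int) : Prop :=
  (user_bid_map.map Prod.fst).Nodup ∧ ∀ p ∈ user_bid_map, p.2.Nodup
instance (row : String × List String) (user_bid_map : List (String × List String)) (filter_threshold : Int) : Decidable (Pre_find_neighbors_set row user_bid_map filter_threshold) := by unfold Pre_find_neighbors_set; infer_instance

def pvWitness_find_neighbors_set : (String × List String) × (List (String × List String)) × Int :=
  (("u0", ["b1", "b2"]), [("u0", ["b1"]), ("u1", ["b1", "b2"]), ("u2", ["b3"])], 1)

def Spec_find_neighbors_set (row : String × List String) (user_bid_map : List (String × List String)) (filter_threshold : Int) (out : String × List String) : Prop := out = find_neighbors_set_alt row user_bid_map filter_threshold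
instance (row : String × List String) (user_bid_map : List (String × List String)) (filter_threshold : Int) (out : String × List String) : Decidable (Spec_find_neighbors_set row user_bid_map filter_threshold out) := by unfold Spec_find_neighbors_set; infer_instance

-- ===== CLAIM (what is proved, stated in full; the proofs are below) =====
def Claim_equal_find_neighbors_set : Prop := ∀ (row : String × List String) (user_bid_map : List (String × List String)) (filter_threshold : Int), Dom_find_neighbors_set row user_bid_map filter_threshold → Pre_find_neighbors_set row user_bid_map filter_threshold → Spec_find_neighbors_set row user_bid_map filter_threshold (find_neighbors_set row user_bid_map filter_threshold)

-- ===== LEMMAS AND PROOFS =====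

-- The inner index-building loop over one user's business list.
theorem idx_inner (l : List String) (u : String) (d : PySem.Dict String (List String)) (b : String) :
    (l.foldl (fun ix c => ix.modify c [] (fun s => s ++ [u])) d).getD b []
      = d.getD b [] ++ List.replicate (l.count b) u := by
  induction l generalizing d with
  | nil => simp
  | cons c l ih =>
    simp only [List.foldl_cons, ih, PySem.Dict.getD_modify, List.count_cons]
    by_cases h : b = c
    · subst h; simp [List.replicate_succ]
    · have : (c == b) = false := by simp [beq_eq_false_iff_ne]; exact fun e => h e.symm
      simp [h, this]

-- The whole index: getD b collects, in map order, each user once per occurrence of b.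
theorem idx_getD (m : List (String × List String)) (d : PySem.Dict String (List String)) (b : String) :
    (m.foldl (fun ix p => p.2.foldl (fun ix c => ix.modify c [] (fun s => s ++ [p.1])) ix) d).getD b []
      = d.getD b [] ++ m.flatMap (fun p => List.replicate (p.2.count b) p.1) := by
  induction m generalizing d with
  | nil => simp
  | cons p m ih => simp [List.foldl_cons, ih, idx_inner, List.append_assoc]

-- The counting double loop is a counter over the concatenation of the hit lists.
theorem counts_getD (bs : List String) (f : String → List String) (d : PySem.Dict String Int) (u : String) :
    (bs.foldl (fun c b => (f b).foldl (fun c v => c.modify v 0 (fun n => n + 1)) c) d).getD u 0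
      = d.getD u 0 + ((bs.flatMap f).count u : Int) := by
  induction bs generalizing d with
  | nil => simp
  | cons b bs ih =>
    simp only [List.foldl_cons, ih, PySem.Dict.getD_foldl_modify_add_one, List.flatMap_cons,
      List.count_append]
    push_cast; ring

-- No occurrences of u among blocks whose key is never u.
theorem count_flatMap_zero (m : List (String × List String)) (b u : String)
    (h : u ∉ m.map Prod.fst) :
    (m.flatMap (fun p => List.replicate (p.2.count b) p.1)).count u = 0 := by
  induction m with
  | nil => simp
  | cons p m ih =>
    simp only [List.map_cons, List.mem_cons] at h
    push Not at h
    have hne : (p.1 == u) = false := by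
      simp only [beq_eq_false_iff_ne]; exact fun e => h.1 e.symm
    simp [List.count_append, ih h.2, List.count_replicate, hne]

-- With distinct keys, the number of occurrences of u in index[b] is u's own count of b.
theorem count_flatMap_key (m : List (String × List String)) (b : String) (p : String × List String)
    (hn : (m.map Prod.fst).Nodup) (hm : p ∈ m) :
    (m.flatMap (fun q => List.replicate (q.2.count b) q.1)).count p.1 = p.2.count b := by
  induction m with
  | nil => cases hm
  | cons q m ih =>
    simp only [List.map_cons, List.nodup_cons] at hn
    rcases List.mem_cons.mp hm with h | h
    · subst h
      have : p.1 ∉ m.map Prod.fst := hn.1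
      simp [List.count_append, count_flatMap_zero m b p.1 this]
    · have hne : q.1 ≠ p.1 := by
        intro e; exact hn.1 (e ▸ List.mem_map.mpr ⟨p, h, rfl⟩)
      simp [List.count_append, List.count_replicate, ih hn.2 h,
        (by simpa using hne : ¬ (q.1 == p.1) = true)]

-- Summing counts of a Nodup list over bs is the filtered length (= |bs ∩ bids| in A).
theorem sum_count_eq_filter (bs bids : List String) (hb : bids.Nodup) :
    (bs.flatMap (fun b => List.replicate (bids.count b) "x")).length = (bs.filter (fun b => bids.contains b)).length := by
  induction bs with
  | nil => simp
  | cons b bs ih =>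
    by_cases h : b ∈ bids
    · have : bids.count b = 1 := List.count_eq_one_of_mem hb h
      simp [this, h, ih]
    · have : bids.count b = 0 := List.count_eq_zero.mpr h
      simp [this, h, ih]

-- Per key p ∈ m: B's counter value equals A's intersection size.
theorem counts_eq_inter (bs : List String) (m : List (String × List String))
    (p : String × List String)
    (hn : (m.map Prod.fst).Nodup) (hv : ∀ q ∈ m, q.2.Nodup) (hm : p ∈ m) :
    (bs.foldl
        (fun c b =>
          ((m.foldl (fun ix q => q.2.foldl (fun ix c' => ix.modify c' [] (fun s => s ++ [q.1])) ix)
              PySem.Dict.empty).getD b []).foldl (fun c v => c.modify v 0 (fun n => n + 1)) c)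
        PySem.Dict.empty).getD p.1 0
      = PySem.Set.len (PySem.Set.inter bs p.2) := by
  rw [counts_getD]
  have hidx : ∀ b, (m.foldl (fun ix q => q.2.foldl (fun ix c' => ix.modify c' [] (fun s => s ++ [q.1])) ix)
      PySem.Dict.empty).getD b [] = m.flatMap (fun q => List.replicate (q.2.count b) q.1) := by
    intro b; rw [idx_getD]; simp
  have hcount : (bs.flatMap fun b =>
      (m.foldl (fun ix q => q.2.foldl (fun ix c' => ix.modify c' [] (fun s => s ++ [q.1])) ix)
        PySem.Dict.empty).getD b []).count p.1
      = (bs.flatMap (fun b => List.replicate (p.2.count b) "x")).length := by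
    induction bs with
    | nil => simp
    | cons b bs ih =>
      simp only [hidx] at ih ⊢
      simp [List.flatMap_cons, List.count_append, List.length_append, ih,
        count_flatMap_key m b p hn hm, List.length_replicate]
  rw [hcount, sum_count_eq_filter bs p.2 (hv p hm)]
  simp [PySem.Set.len, PySem.Set.inter]

-- ===== VERDICT (by name: the statement is the Claim_ definition above) =====
theorem find_neighbors_set_spec : Claim_equal_find_neighbors_set := by
  intro row m t _ hpre
  obtain ⟨hn, hv⟩ := hpre
  unfold Spec_find_neighbors_set find_neighbors_set find_neighbors_set_alt
  simp only []
  refine Prod.ext rfl ?_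
  apply PySem.List.foldl_congr_mem
  intro acc p hp
  have h := counts_eq_inter row.2 m p hn hv hp
  rw [h]
  by_cases he : row.1 = p.1
  · simp [he]
  · simp [he, Ne.symm he]
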